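-- pv_equiv track=rewrite | github.com/antek4634/Puzzle | main.py | finding_pieces
-- ===== SOURCE A (Python) =====
-- def making_dict(matrix:list) -> dict: # Check
--
--     '''
--     Ta funkcja zmienia nam naszą macierz na słownik z koordynatami każdego z klocków
--      w postaci listy tupli[(wiersz, kolumna)]
--     Args:
--         matrix: Macierz z reprezentacją naszych klocków
--     Returns:
--         Słownik z koordyntami każdego klocka gdzie kolor kolor klocka to key a koordynaty to values
--     '''
--
--     ans = {}
--     for row in range(len(matrix)):
--         for col in range(len(matrix[row])):
--             curr_value = matrix[row][col]
--             if curr_value in ans: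
--                 ans[curr_value].append((row, col))
--             else:
--                 ans[curr_value] = [(row, col)] # Jeśli pierwszy raz znajdujemy część klocka to ją dodajemy
--     return ans
--
-- def finding_pieces(fullmatrix:list, missingmatrix:list) -> dict: # Check
--     '''
--     Funkcja ta na podstawie zapełnionej macierzy i macierzy do
--     wypełnienia znajduje nam brakującego klocki do naszej układanki
--     i zwraca nam je w postaci słownika z koordynatami, które ustalają nam kształt klocka
--
--     Args:
--         fullmatrix: Macierz bez pustych miejsc w której są wszystkie klocki których możemy użyć
--         missingmatrix: Macierz niezapełniona w której nie ma niektorych klocków z fullmatrix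
--
--     Returns:
--          Słownik w którym są wszystkie koordynaty klocków których brakuje missingmatrix
--
--     '''
--     missing_pieces = {}
--     full = making_dict(fullmatrix)
--     missing = making_dict(missingmatrix)
--     for i in full:
--         if i not in missing:
--             missing_pieces[i] = full[i]
--     return missing_pieces
-- ===== SOURCE B (Python) =====
-- def finding_pieces(fullmatrix: list, missingmatrix: list) -> dict:
--     # Phase 1: the keys of the answer, in first-occurrence (row-major) order:
--     # distinct values of fullmatrix that appear nowhere in missingmatrix.
--     missing_vals = [v for row in missingmatrix for v in row]
--     keys = []
--     for row in fullmatrix: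
--         for v in row:
--             if v not in keys and v not in missing_vals:
--                 keys.append(v)
--     # Phase 2: for each key, rescan fullmatrix to collect its coordinates.
--     return {k: [(r, c)
--                 for r, row in enumerate(fullmatrix)
--                 for c, v in enumerate(row) if v == k]
--             for k in keys}
-- ===== Notes on version B (the rewrite author's own statement) =====
-- stated objective: alternative
-- what changed: B builds no coordinate dict at all: it first collects the distinct fullmatrix values absent from missingmatrix (first-occurrence order), then for each such key rescans fullmatrix with a comprehension to gather that key's coordinates, trading A's single grouped dict build for per-key passes.
import Mathlib
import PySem

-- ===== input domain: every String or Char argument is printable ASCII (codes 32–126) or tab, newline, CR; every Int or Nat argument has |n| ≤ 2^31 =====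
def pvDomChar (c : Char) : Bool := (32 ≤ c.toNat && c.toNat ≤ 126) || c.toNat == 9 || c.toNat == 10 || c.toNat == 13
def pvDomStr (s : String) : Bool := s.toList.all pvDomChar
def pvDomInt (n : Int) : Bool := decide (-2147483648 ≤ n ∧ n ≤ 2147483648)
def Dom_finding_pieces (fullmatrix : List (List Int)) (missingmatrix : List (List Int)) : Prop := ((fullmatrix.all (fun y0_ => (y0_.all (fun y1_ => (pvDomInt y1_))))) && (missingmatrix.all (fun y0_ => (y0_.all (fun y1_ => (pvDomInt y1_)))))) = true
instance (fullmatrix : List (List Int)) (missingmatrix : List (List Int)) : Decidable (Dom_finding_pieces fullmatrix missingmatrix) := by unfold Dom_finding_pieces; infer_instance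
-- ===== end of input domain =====

-- B builds no coordinate dict: it first lists the missing colours in first-occurrence order,
-- then rescans fullmatrix once per colour for its coordinates (alternative decomposition, not faster).

-- ===== PORT A =====
def making_dict (matrix : List (List Int)) : PySem.Dict Int (List (Int × Int)) :=
  (PySem.List.pyRange 0 (PySem.List.len matrix) 1).foldl (fun ans row =>
    let currRow := PySem.List.pyGetD matrix row []
    (PySem.List.pyRange 0 (PySem.List.len currRow) 1).foldl (fun ans col =>
      let curr_value := PySem.List.pyGetD currRow col 0
      if ans.contains curr_value then
        ans.modify curr_value [] (fun x => x ++ [(row, col)])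
      else
        ans.insert curr_value [(row, col)]) ans) PySem.Dict.empty

def finding_pieces (fullmatrix : List (List Int)) (missingmatrix : List (List Int)) : List (Int × List (Int × Int)) :=
  let full := making_dict fullmatrix
  let missing := making_dict missingmatrix
  (full.keys.foldl (fun missing_pieces i =>
      if !(missing.contains i) then missing_pieces.insert i (full.getD i []) else missing_pieces)
    PySem.Dict.empty).items

-- ===== PORT B =====
def finding_pieces_alt (fullmatrix : List (List Int)) (missingmatrix : List (List Int)) : List (Int × List (Int × Int)) :=
  let missing_vals := missingmatrix.flatMap (fun row => row)
  let keys := fullmatrix.foldl (fun ks row =>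
      row.foldl (fun ks v => if v ∈ ks ∨ v ∈ missing_vals then ks else ks ++ [v]) ks) []
  keys.map (fun k => (k,
    (PySem.List.enumerate fullmatrix).flatMap (fun rr =>
      (PySem.List.enumerate rr.2).filterMap (fun cv =>
        if cv.2 = k then some (rr.1, cv.1) else none))))

-- ===== PRECONDITION & SPEC =====
def Spec_finding_pieces (fullmatrix : List (List Int)) (missingmatrix : List (List Int)) (out : List (Int × List (Int × Int))) : Prop := out = finding_pieces_alt fullmatrix missingmatrix
instance (fullmatrix : List (List Int)) (missingmatrix : List (List Int)) (out : List (Int × List (Int × Int))) : Decidable (Spec_finding_pieces fullmatrix missingmatrix out) := by unfold Spec_finding_pieces; infer_instance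

-- ===== CLAIM (what is proved, stated in full; the proofs are below) =====
def Claim_equal_finding_pieces : Prop := ∀ (fullmatrix : List (List Int)) (missingmatrix : List (List Int)), Dom_finding_pieces fullmatrix missingmatrix → Spec_finding_pieces fullmatrix missingmatrix (finding_pieces fullmatrix missingmatrix)

-- ===== LEMMAS AND PROOFS =====

-- one grouping step: d[v].append(rc) with default []
def pvStep (d : PySem.Dict Int (List (Int × Int))) (p : Int × (Int × Int)) : PySem.Dict Int (List (Int × Int)) :=
  d.modify p.1 [] (fun x => x ++ [p.2])

-- the row-major stream of (value, (row, col)) cells of a matrix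
def pvCells (m : List (List Int)) : List (Int × (Int × Int)) :=
  (PySem.List.enumerate m).flatMap (fun rr => (PySem.List.enumerate rr.2).map (fun cv => (cv.2, (rr.1, cv.1))))

lemma pvFoldl_fun_congr {α β : Type} (f g : α → β → α) (h : ∀ a b, f a b = g a b) :
    ∀ (l : List β) (init : α), l.foldl f init = l.foldl g init := by
  intro l
  induction l with
  | nil => intro init; rfl
  | cons x xs ih => intro init; rw [List.foldl_cons, List.foldl_cons, h, ih]

lemma pvModify_not_contains (d : PySem.Dict Int (List (Int × Int))) (k : Int) (d0 : List (Int × Int))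
    (f : List (Int × Int) → List (Int × Int)) (h : d.contains k = false) :
    d.modify k d0 f = d.insert k (f d0) := by
  have hg : d.getD k d0 = d0 := PySem.Dict.getD_of_not_contains d d0 h
  simp [PySem.Dict.modify, PySem.Dict.insert, hg]

lemma pvStep_eq_branch (d : PySem.Dict Int (List (Int × Int))) (v : Int) (rc : Int × Int) :
    (if d.contains v then d.modify v [] (fun x => x ++ [rc]) else d.insert v [rc]) = pvStep d (v, rc) := by
  by_cases h : d.contains v
  · simp [pvStep, h]
  · simp only [Bool.not_eq_true] at h
    simp [h, pvStep, pvModify_not_contains d v [] _ h]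

lemma pvNest (g : PySem.Dict Int (List (Int × Int)) → Int × (Int × Int) → PySem.Dict Int (List (Int × Int)))
    (mm : List (List Int)) (init : PySem.Dict Int (List (Int × Int))) :
    (pvCells mm).foldl g init =
      (PySem.List.enumerate mm).foldl (fun a rr =>
        (PySem.List.enumerate rr.2).foldl (fun a cv => g a (cv.2, (rr.1, cv.1))) a) init := by
  unfold pvCells
  rw [List.foldl_flatMap]
  refine pvFoldl_fun_congr _ _ (fun a rr => ?_) _ _
  rw [List.foldl_map]

lemma pvRow (row : List Int) (j : Int) (ans : PySem.Dict Int (List (Int × Int))) :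
    (PySem.List.pyRange 0 (PySem.List.len row) 1).foldl (fun ans col =>
        let curr_value := PySem.List.pyGetD row col 0
        if ans.contains curr_value then
          ans.modify curr_value [] (fun x => x ++ [(j, col)])
        else ans.insert curr_value [(j, col)]) ans
      = (PySem.List.enumerate row).foldl (fun a cv => pvStep a (cv.2, (j, cv.1))) ans := by
  rw [PySem.List.enumerate_eq_map_pyRange row (0 : Int), List.foldl_map]
  exact pvFoldl_fun_congr _ _
    (fun a c => pvStep_eq_branch a (PySem.List.pyGetD row c 0) (j, c)) _ _

lemma pvA_eq (m : List (List Int)) :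
    making_dict m = (pvCells m).foldl pvStep PySem.Dict.empty := by
  rw [pvNest pvStep m PySem.Dict.empty]
  unfold making_dict
  rw [PySem.List.enumerate_eq_map_pyRange m ([] : List Int), List.foldl_map]
  refine pvFoldl_fun_congr _ _ (fun ans j => ?_) _ _
  exact pvRow (PySem.List.pyGetD m j []) j ans

lemma pvFlat_enum (m : List (List Int)) (s : Int) :
    (PySem.List.enumerate m s).flatMap (fun rr => rr.2) = m.flatten := by
  induction m generalizing s with
  | nil => simp [PySem.List.enumerate_nil]
  | cons x xs ih => simp [PySem.List.enumerate_cons, ih]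

lemma pvVals (m : List (List Int)) : (pvCells m).map (fun p => p.1) = m.flatten := by
  unfold pvCells
  rw [List.map_flatMap]
  have h1 : ∀ rr : Int × List Int,
      ((PySem.List.enumerate rr.2).map (fun cv : Int × Int => (cv.2, (rr.1, cv.1)))).map
          (fun p : Int × (Int × Int) => p.1) = rr.2 := by
    intro rr
    rw [List.map_map]
    exact PySem.List.map_snd_enumerate rr.2 0
  simp only [h1]
  exact pvFlat_enum m 0

lemma pvKeys (l : List (Int × (Int × Int))) :
    (l.foldl pvStep PySem.Dict.empty).keys = PySem.Set.ofList (l.map (fun p => p.1)) := by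
  have h := PySem.Dict.keys_foldl_modify_key l (fun p : Int × (Int × Int) => p.1)
    ([] : List (Int × Int)) (fun _ p => fun x => x ++ [p.2]) PySem.Dict.empty
  exact h.trans (by rw [PySem.Dict.keys_empty]; exact PySem.Set.update_empty _)

lemma pvNodup (l : List (Int × (Int × Int))) :
    (l.foldl pvStep PySem.Dict.empty).keys.Nodup := by
  exact PySem.Dict.nodup_keys_foldl_modify_key l (fun p : Int × (Int × Int) => p.1)
    ([] : List (Int × Int)) (fun _ p => fun x => x ++ [p.2]) PySem.Dict.empty
    (by simp [PySem.Dict.keys_empty])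

lemma pvGetD (l : List (Int × (Int × Int))) (c : Int) :
    (l.foldl pvStep PySem.Dict.empty).getD c [] =
      (l.filter (fun p => p.1 == c)).map (fun p => p.2) := by
  have h := PySem.Dict.getD_foldl_modify_append l PySem.Dict.empty c
  exact h.trans (by simp [PySem.Dict.getD_empty])

lemma pvOfList_filter_aux (p : Int → Bool) (xs : List Int) :
    ∀ s : List Int, List.foldl PySem.Set.add (s.filter p) (xs.filter p) =
      (List.foldl PySem.Set.add s xs).filter p := by
  induction xs with
  | nil => intro s; simp
  | cons x xs ih =>
    intro s
    by_cases hp : p x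
    · have hstep : PySem.Set.add (s.filter p) x = (PySem.Set.add s x).filter p := by
        by_cases hm : x ∈ s
        · simp [PySem.Set.add, hm, hp]
        · simp [PySem.Set.add, hm, hp, List.filter_append]
      rw [List.filter_cons_of_pos hp, List.foldl_cons, hstep, List.foldl_cons]
      exact ih (PySem.Set.add s x)
    · have hstep : (PySem.Set.add s x).filter p = s.filter p := by
        by_cases hm : x ∈ s
        · simp [PySem.Set.add, hm]
        · simp [PySem.Set.add, hm, hp, List.filter_append]
      rw [List.filter_cons_of_neg hp, List.foldl_cons, ← hstep]
      exact ih (PySem.Set.add s x)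

lemma pvOfList_filter (p : Int → Bool) (xs : List Int) :
    PySem.Set.ofList (xs.filter p) = (PySem.Set.ofList xs).filter p := by
  have h := pvOfList_filter_aux p xs []
  simpa [PySem.Set.ofList, PySem.Set.empty] using h

-- A in canonical form: keys = distinct fullmatrix values not in missingmatrix, values = filtered cell stream
lemma pvA_canon (f m : List (List Int)) :
    finding_pieces f m =
      ((PySem.Set.ofList f.flatten).filter (fun i => !decide (i ∈ m.flatten))).map
        (fun k => (k, ((pvCells f).filter (fun p => p.1 == k)).map (fun p => p.2))) := by
  show ((making_dict f).keys.foldl (fun mp i =>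
      if !(making_dict m).contains i then mp.insert i ((making_dict f).getD i []) else mp)
    PySem.Dict.empty).items = _
  rw [← List.foldl_filter]
  rw [PySem.Dict.items_foldl_insert_fresh _ (fun i => i) (fun i => (making_dict f).getD i [])
      PySem.Dict.empty (by intro a _; exact PySem.Dict.contains_empty a)
      (by
        simp only [List.map_id']
        exact List.Nodup.filter _ (by rw [pvA_eq]; exact pvNodup _))]
  have hc : (fun i => !(making_dict m).contains i) = (fun i : Int => !decide (i ∈ m.flatten)) := by
    funext i
    rw [pvA_eq, PySem.Dict.contains_eq_decide_mem_keys, pvKeys, pvVals]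
    simp [PySem.Set.mem_ofList]
  rw [hc]
  have hkeys : (making_dict f).keys = PySem.Set.ofList f.flatten := by
    rw [pvA_eq, pvKeys, pvVals]
  have hval : ∀ a : Int, (making_dict f).getD a [] =
      ((pvCells f).filter (fun p => p.1 == a)).map (fun p => p.2) := fun a => by
    rw [pvA_eq, pvGetD]
  rw [hkeys]
  simp only [hval]
  rfl

-- B's phase-1 key list equals the deduplicated, missing-filtered flattened fullmatrix
lemma pvB_keys (f m : List (List Int)) :
    f.foldl (fun ks row =>
        row.foldl (fun ks v =>
          if v ∈ ks ∨ v ∈ m.flatMap (fun row => row) then ks else ks ++ [v]) ks) [] =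
      (PySem.Set.ofList f.flatten).filter (fun i => !decide (i ∈ m.flatten)) := by
  have hmv : m.flatMap (fun row => row) = m.flatten := by
    induction m with
    | nil => rfl
    | cons x xs ih => simp [ih]
  rw [hmv, ← List.foldl_flatten]
  have hstep : ∀ (ks : List Int) (v : Int),
      (if v ∈ ks ∨ v ∈ m.flatten then ks else ks ++ [v]) =
        (if (!decide (v ∈ m.flatten)) = true then PySem.Set.add ks v else ks) := by
    intro ks v
    by_cases hm : v ∈ m.flatten
    · simp [hm]
    · by_cases hk : v ∈ ks <;> simp [PySem.Set.add, hm, hk]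
  rw [pvFoldl_fun_congr _ _ hstep]
  rw [← List.foldl_filter]
  rw [← pvOfList_filter]
  rfl

-- B's phase-2 comprehension equals the filtered cell stream
lemma pvB_val (f : List (List Int)) (k : Int) :
    (PySem.List.enumerate f).flatMap (fun rr =>
        (PySem.List.enumerate rr.2).filterMap (fun cv =>
          if cv.2 = k then some (rr.1, cv.1) else none)) =
      ((pvCells f).filter (fun p => p.1 == k)).map (fun p => p.2) := by
  unfold pvCells
  induction PySem.List.enumerate f (0 : Int) with
  | nil => rfl
  | cons rr rest ih =>
    simp only [List.flatMap_cons, List.filter_append, List.map_append, ih]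
    congr 1
    induction PySem.List.enumerate rr.2 (0 : Int) with
    | nil => rfl
    | cons cv cvs ih2 =>
      by_cases h : cv.2 = k
      · simp [h, ih2]
      · simp [h, ih2]

lemma pv_main (f m : List (List Int)) : finding_pieces f m = finding_pieces_alt f m := by
  rw [pvA_canon]
  show _ = (f.foldl (fun ks row =>
      row.foldl (fun ks v =>
        if v ∈ ks ∨ v ∈ m.flatMap (fun row => row) then ks else ks ++ [v]) ks) []).map _
  rw [pvB_keys]
  exact List.map_congr_left (fun k _ => by rw [pvB_val])

-- ===== VERDICT (by name: the statement is the Claim_ definition above) =====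
theorem finding_pieces_spec : Claim_equal_finding_pieces := by
  intro f m _
  unfold Spec_finding_pieces
  exact pv_main f m
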